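-- pv_equiv track=rewrite | github.com/abdu292/trade-auto | aiworker/app/services/telegram_news.py | _count_keyword_hits
-- ===== SOURCE A (Python) =====
-- def _count_keyword_hits(lines: list[str], keywords: list[str]) -> int:
--     if not keywords:
--         return 0
--
--     hit_count = 0
--     lowered = [line.lower() for line in lines]
--     for keyword in keywords:
--         key = keyword.strip().lower()
--         if not key:
--             continue
--         if any(key in line for line in lowered):
--             hit_count += 1
--
--     return hit_count
-- ===== SOURCE B (Python) =====
-- def _count_keyword_hits(lines: list[str], keywords: list[str]) -> int:
--     # Line-major traversal with a shrinking worklist: walk the lines once,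
--     # dropping each distinct stripped/lowered key from `pending` as soon as some
--     # line contains it; finally count keywords whose key was dropped.
--     keys = [kw.strip().lower() for kw in keywords]
--     pending = list(dict.fromkeys(k for k in keys if k))
--     for line in lines:
--         if not pending:
--             break
--         low = line.lower()
--         pending = [key for key in pending if key not in low]
--     rest = set(pending)
--     return sum(1 for key in keys if key and key not in rest)
-- ===== Notes on version B (the rewrite author's own statement) =====
-- stated objective: alternative
-- what changed: Reverses the traversal: instead of a keyword-major loop with an inner any() over all lowered lines, B makes one line-major pass over a shrinking worklist of distinct stripped/lowered keys (dropping a key as soon as a line contains it, breaking when the worklist is empty) and finally counts keywords whose key was dropped; duplicates and empty keys behave identically.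
import Mathlib
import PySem

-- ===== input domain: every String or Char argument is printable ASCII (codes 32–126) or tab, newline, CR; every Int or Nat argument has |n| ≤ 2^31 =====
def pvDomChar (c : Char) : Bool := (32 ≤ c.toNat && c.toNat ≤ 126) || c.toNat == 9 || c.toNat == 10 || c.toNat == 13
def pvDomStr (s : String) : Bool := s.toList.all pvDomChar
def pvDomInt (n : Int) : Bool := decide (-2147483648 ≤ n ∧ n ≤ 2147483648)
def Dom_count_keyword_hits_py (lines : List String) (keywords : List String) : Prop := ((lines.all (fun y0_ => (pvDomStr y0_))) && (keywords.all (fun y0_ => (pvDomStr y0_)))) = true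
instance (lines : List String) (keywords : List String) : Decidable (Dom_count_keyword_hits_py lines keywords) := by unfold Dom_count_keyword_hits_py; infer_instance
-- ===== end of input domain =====

-- B reverses the traversal: a single line-major pass over a shrinking worklist of
-- distinct keys, then a count over the keyword list — instead of A's keyword-major
-- loop with an inner any() over all lowered lines; same exact result.

-- ===== PORT A =====
def count_keyword_hits_py (lines : List String) (keywords : List String) : Int :=
  if keywords = [] then 0
  else
    let lowered := lines.map PySem.Str.lower
    keywords.foldl (fun hit_count keyword =>
      let key := PySem.Str.lower (PySem.Str.strip keyword)
      if key = "" then hit_count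
      else if lowered.any (fun line => PySem.Str.isIn key line) then hit_count + 1
      else hit_count) 0

-- ===== PORT B =====
-- the 'for line in lines' loop of Source B, with its early 'break' on an empty worklist
def pvPendingLoop (lines : List String) (pending : List String) : List String :=
  match lines with
  | [] => pending
  | line :: rest =>
      if pending = [] then pending
      else
        let low := PySem.Str.lower line
        pvPendingLoop rest (pending.filter (fun key => ¬ PySem.Str.isIn key low))

def count_keyword_hits_py_alt (lines : List String) (keywords : List String) : Int :=
  let keys := keywords.map (fun kw => PySem.Str.lower (PySem.Str.strip kw))
  let pending0 := PySem.List.dedup (keys.filter (fun k => k ≠ ""))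
  let pending := pvPendingLoop lines pending0
  let rest : PySem.Set String := PySem.Set.ofList pending
  keys.foldl (fun acc key =>
    if key ≠ "" ∧ ¬ PySem.Set.contains rest key then acc + 1 else acc) 0

-- ===== PRECONDITION & SPEC =====
def Spec_count_keyword_hits_py (lines : List String) (keywords : List String) (out : Int) : Prop := out = count_keyword_hits_py_alt lines keywords
instance (lines : List String) (keywords : List String) (out : Int) : Decidable (Spec_count_keyword_hits_py lines keywords out) := by unfold Spec_count_keyword_hits_py; infer_instance

-- ===== CLAIM (what is proved, stated in full; the proofs are below) =====
def Claim_equal_count_keyword_hits_py : Prop := ∀ (lines : List String) (keywords : List String), Dom_count_keyword_hits_py lines keywords → Spec_count_keyword_hits_py lines keywords (count_keyword_hits_py lines keywords)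

-- ===== LEMMAS AND PROOFS =====

-- A key survives the worklist loop iff it was pending and no line contains it.
theorem pv_mem_pendingLoop (lines : List String) (pending : List String) (k : String) :
    k ∈ pvPendingLoop lines pending
      ↔ k ∈ pending ∧ ∀ line ∈ lines, PySem.Str.isIn k (PySem.Str.lower line) = false := by
  induction lines generalizing pending with
  | nil => simp [pvPendingLoop]
  | cons line rest ih =>
      unfold pvPendingLoop
      by_cases hp : pending = []
      · subst hp; simp
      · rw [if_neg hp]
        simp only [ih, List.mem_filter, List.mem_cons]
        constructor
        · rintro ⟨⟨h1, h2⟩, h3⟩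
          refine ⟨h1, ?_⟩
          rintro l (rfl | hl)
          · simpa using h2
          · exact h3 l hl
        · rintro ⟨h1, h2⟩
          exact ⟨⟨h1, by simpa using h2 line (Or.inl rfl)⟩, fun l hl => h2 l (Or.inr hl)⟩

theorem count_keyword_hits_py_eq (lines keywords : List String) :
    count_keyword_hits_py lines keywords = count_keyword_hits_py_alt lines keywords := by
  unfold count_keyword_hits_py count_keyword_hits_py_alt
  by_cases hk : keywords = []
  · subst hk; simp
  · rw [if_neg hk]
    simp only []
    rw [List.foldl_map]
    apply PySem.List.foldl_congr_mem
    intro acc keyword hmem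
    set key := PySem.Str.lower (PySem.Str.strip keyword) with hkey
    by_cases h0 : key = ""
    · rw [if_pos h0, if_neg (by simp [h0])]
    · rw [if_neg h0]
      have hrest : PySem.Set.contains (PySem.Set.ofList
          (pvPendingLoop lines (PySem.List.dedup
            ((keywords.map (fun kw => PySem.Str.lower (PySem.Str.strip kw))).filter
              (fun k => k ≠ ""))))) key = true
          ↔ ∀ line ∈ lines, PySem.Str.isIn key (PySem.Str.lower line) = false := by
        rw [PySem.Set.contains_iff, PySem.Set.mem_ofList, pv_mem_pendingLoop,
          PySem.List.mem_dedup, List.mem_filter]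
        constructor
        · exact fun h => h.2
        · intro h
          exact ⟨⟨List.mem_map_of_mem hmem, by simpa using h0⟩, h⟩
      by_cases hany : (lines.map PySem.Str.lower).any (fun line => PySem.Str.isIn key line) = true
      · rw [if_pos hany, if_pos ?_]
        refine ⟨h0, ?_⟩
        intro hc
        rw [hrest] at hc
        simp only [List.any_map, List.any_eq_true, Function.comp] at hany
        obtain ⟨l, hl, hin⟩ := hany
        rw [hc l hl] at hin
        exact Bool.false_ne_true hin
      · rw [if_neg hany, if_neg ?_]
        rintro ⟨-, hc⟩
        apply hc
        rw [hrest]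
        intro l hl
        simp only [List.any_map, List.any_eq_true, Function.comp] at hany
        push Not at hany
        simpa using hany l hl

-- ===== VERDICT (by name: the statement is the Claim_ definition above) =====
theorem count_keyword_hits_py_spec : Claim_equal_count_keyword_hits_py := by
  intro lines keywords _
  unfold Spec_count_keyword_hits_py
  exact count_keyword_hits_py_eq lines keywords
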